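-- pv_equiv track=rewrite | github.com/manwar/perlweeklychallenge-club | challenge-094/roger-bell-west/python/ch-1.py | wh
-- ===== SOURCE A (Python) =====
-- def wh(word):
--     w=word.lower()
--     if not w.isalpha():
--         return 0
--     b=ord('a')
--     p=list([2,3,5,7,11,13,17,19,23,29,31,37,41,43,47,53,59,61,67,71,73,79,83,89,97,101])
--     n=1
--     for c in w:
--         n *= p[ord(c)-b]
--     return n
-- ===== SOURCE B (Python) =====
-- def wh(word):
--     w = word.lower()
--     if not w.isalpha():
--         return 0
--     # compute the first 26 primes (2..101) by trial division instead of hardcoding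
--     primes = [m for m in range(2, 102) if all(m % d != 0 for d in range(2, m))]
--     counts = {}
--     for c in w:
--         counts[c] = counts.get(c, 0) + 1
--     n = 1
--     for c, k in counts.items():
--         n *= primes[ord(c) - ord('a')] ** k
--     return n
-- ===== Notes on version B (the rewrite author's own statement) =====
-- stated objective: alternative
-- what changed: B computes the first 26 primes itself by trial division instead of hardcoding the list, and replaces A's per-character multiply loop with a frequency dict built in one pass followed by a product of prime**count over the distinct letters (correct by commutativity of multiplication).
import Mathlib
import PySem

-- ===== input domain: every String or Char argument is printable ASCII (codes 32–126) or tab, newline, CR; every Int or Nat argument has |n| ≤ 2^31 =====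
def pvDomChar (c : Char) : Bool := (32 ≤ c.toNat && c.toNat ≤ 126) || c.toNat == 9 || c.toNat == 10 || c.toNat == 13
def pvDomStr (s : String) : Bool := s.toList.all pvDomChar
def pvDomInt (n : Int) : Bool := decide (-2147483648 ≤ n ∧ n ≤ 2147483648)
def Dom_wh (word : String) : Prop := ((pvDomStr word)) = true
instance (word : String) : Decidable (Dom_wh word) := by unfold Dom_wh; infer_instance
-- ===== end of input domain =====

-- B derives the 26 primes by trial division instead of hardcoding them, and replaces A's
-- per-character multiply loop with a frequency dict then a product of prime ** count over
-- the distinct letters (objective: alternative; same cost class).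

-- ===== PORT A =====
def wh (word : String) : Int :=
  let w := PySem.Str.lower word
  if !(PySem.Str.strIsalpha w) then 0
  else
    let p : List Int := [2, 3, 5, 7, 11, 13, 17, 19, 23, 29, 31, 37, 41,
                         43, 47, 53, 59, 61, 67, 71, 73, 79, 83, 89, 97, 101]
    -- p[ord(c)-97]: pyGet? with default 0; under the isalpha guard the index is
    -- always in range (0..25), so Python never raises here and the default is dead.
    w.toList.foldl (fun n c => n * (PySem.List.pyGet? p ((c.toNat : Int) - 97)).getD 0) 1

-- ===== PORT B =====
def wh_alt (word : String) : Int :=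
  let w := PySem.Str.lower word
  if !(PySem.Str.strIsalpha w) then 0
  else
    -- [m for m in range(2, 102) if all(m % d != 0 for d in range(2, m))]
    let primes : List Int :=
      (PySem.List.pyRange 2 102 1).filter
        (fun m => (PySem.List.pyRange 2 m 1).all (fun d => PySem.Int.mod m d != 0))
    let counts : PySem.Dict Char Int :=
      w.toList.foldl (fun d c => d.insert c (d.getD c 0 + 1)) PySem.Dict.empty
    -- primes[ord(c)-97] ** k: exponent k is a positive count, so .toNat is exact.
    counts.items.foldl
      (fun n pc => n * ((PySem.List.pyGet? primes ((pc.1.toNat : Int) - 97)).getD 0) ^ pc.2.toNat) 1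

-- ===== PRECONDITION & SPEC =====
def Spec_wh (word : String) (out : Int) : Prop := out = wh_alt word
instance (word : String) (out : Int) : Decidable (Spec_wh word out) := by unfold Spec_wh; infer_instance

-- ===== CLAIM (what is proved, stated in full; the proofs are below) =====
def Claim_equal_wh : Prop := ∀ (word : String), Dom_wh word → Spec_wh word (wh word)

-- ===== LEMMAS AND PROOFS =====

-- B's trial-division comprehension produces exactly A's hardcoded prime table
theorem pv_primes_eq :
    (PySem.List.pyRange 2 102 1).filter
        (fun m => (PySem.List.pyRange 2 m 1).all (fun d => PySem.Int.mod m d != 0))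
      = [2, 3, 5, 7, 11, 13, 17, 19, 23, 29, 31, 37, 41,
         43, 47, 53, 59, 61, 67, 71, 73, 79, 83, 89, 97, 101] := by decide

-- a multiply-accumulate fold is the initial value times the product of the mapped list
theorem pv_foldl_mul {α : Type} (f : α → Int) :
    ∀ (l : List α) (a : Int), l.foldl (fun n x => n * f x) a = a * (l.map f).prod := by
  intro l
  induction l with
  | nil => intro a; simp
  | cons x t ih => intro a; simp [ih, mul_assoc]

theorem pv_toFinset_ofList {α : Type} [DecidableEq α] (l : List α) :
    (PySem.Set.ofList l).toFinset = l.toFinset := by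
  ext x
  simp [PySem.Set.mem_ofList]

-- the heart: product over the chars = product of P k ^ count over the distinct chars
theorem pv_prod_count (P : Char → Int) (l : List Char) :
    (l.map P).prod = ((PySem.Set.ofList l).map (fun k => P k ^ l.count k)).prod := by
  rw [Finset.prod_list_map_count l P,
      ← List.prod_toFinset (fun k => P k ^ l.count k) (PySem.Set.nodup_ofList l),
      pv_toFinset_ofList]

-- ===== VERDICT (by name: the statement is the Claim_ definition above) =====
theorem wh_spec : Claim_equal_wh := by
  intro word _
  unfold Spec_wh wh wh_alt
  by_cases h : PySem.Str.strIsalpha (PySem.Str.lower word) = true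
  · simp only [h, Bool.not_true, Bool.false_eq_true, if_false, pv_primes_eq]
    rw [PySem.Dict.foldl_insert_getD_add_one_eq_counter, PySem.Dict.items_counter,
        pv_foldl_mul, pv_foldl_mul, one_mul, one_mul, List.map_map]
    rw [pv_prod_count (fun c => (PySem.List.pyGet? _ ((c.toNat : Int) - 97)).getD 0)]
    simp only [Function.comp_def, Int.toNat_natCast]
  · simp only [Bool.not_eq_true] at h
    simp at h
    simp [h]
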